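-- pv_equiv track=rewrite | github.com/ddlossantos/Semestral-ED | semestralED.py | analizar_propiedades
-- ===== SOURCE A (Python) =====
-- def analizar_propiedades(relacion, base_set):
--     relacion_set = {(str(a), str(b)) for a, b in relacion}
--     propiedades = []
--     if all((str(e), str(e)) in relacion_set for e in base_set):
--         propiedades.append("Reflexiva")
--     if all((b, a) in relacion_set for a, b in relacion_set):
--         propiedades.append("Simétrica")
--     if all((b, a) not in relacion_set for a, b in relacion_set if a != b):
--         propiedades.append("Antisimétrica")
--     if all((a, c) in relacion_set for a, b in relacion_set for b_prime, c in relacion_set if b == b_prime):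
--         propiedades.append("Transitiva")
--     if not propiedades:
--         return "Propiedades: No cumple con ninguna definición"
--     else:
--         return "Propiedades: " + ", ".join(propiedades)
-- ===== SOURCE B (Python) =====
-- def analizar_propiedades(relacion, base_set):
--     rel = set(relacion)
--     propiedades = []
--     if all((e, e) in rel for e in base_set):
--         propiedades.append("Reflexiva")
--     simetrica = True
--     antisimetrica = True
--     succ = {}
--     for a, b in rel:
--         succ.setdefault(a, []).append(b)
--         if (b, a) not in rel:
--             simetrica = False
--         elif a != b:
--             antisimetrica = False
--     if simetrica:
--         propiedades.append("Simétrica")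
--     if antisimetrica:
--         propiedades.append("Antisimétrica")
--     if all((a, c) in rel for a, b in rel for c in succ.get(b, ())):
--         propiedades.append("Transitiva")
--     if not propiedades:
--         return "Propiedades: No cumple con ninguna definición"
--     return "Propiedades: " + ", ".join(propiedades)
-- ===== Notes on version B (the rewrite author's own statement) =====
-- stated objective: alternative
-- what changed: B works on int tuples instead of str() tuples, computes the symmetry and antisymmetry flags in one fused pass over the set, and checks transitivity via a dict indexing pair second-components by first element instead of A's all-pairs cross product.
import Mathlib
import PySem

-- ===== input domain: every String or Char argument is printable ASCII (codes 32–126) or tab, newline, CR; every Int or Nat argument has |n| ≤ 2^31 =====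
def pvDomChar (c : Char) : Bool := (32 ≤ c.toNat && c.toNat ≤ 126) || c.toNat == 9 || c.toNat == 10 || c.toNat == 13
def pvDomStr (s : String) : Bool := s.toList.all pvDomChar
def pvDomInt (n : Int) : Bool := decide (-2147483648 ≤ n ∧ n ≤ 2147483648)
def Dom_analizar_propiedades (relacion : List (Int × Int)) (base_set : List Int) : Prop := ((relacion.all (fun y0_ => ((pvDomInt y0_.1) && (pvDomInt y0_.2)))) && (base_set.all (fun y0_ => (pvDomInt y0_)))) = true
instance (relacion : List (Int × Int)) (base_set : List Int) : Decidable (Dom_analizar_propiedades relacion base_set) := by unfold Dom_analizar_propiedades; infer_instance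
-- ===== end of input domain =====

-- B replaces A's string-tuple set and all-pairs transitivity scan by int tuples, one fused pass for the
-- symmetry/antisymmetry flags, and a dict indexing pairs by first element for the transitivity check (objective: alternative).


-- ===== PORT A =====
-- (str(a), str(b)) for a pair; A builds its set over string pairs
def pvStrPair (p : Int × Int) : String × String := (PySem.Int.toStr p.1, PySem.Int.toStr p.2)

def analizar_propiedades (relacion : List (Int × Int)) (base_set : List Int) : String :=
  let relacion_set : PySem.Set (String × String) := PySem.Set.ofList (relacion.map pvStrPair)
  let propiedades : List String := []
  let propiedades := if base_set.all (fun e => PySem.Set.contains relacion_set (PySem.Int.toStr e, PySem.Int.toStr e))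
    then propiedades ++ ["Reflexiva"] else propiedades
  let propiedades := if relacion_set.all (fun p => PySem.Set.contains relacion_set (p.2, p.1))
    then propiedades ++ ["Simétrica"] else propiedades
  let propiedades := if relacion_set.all (fun p => if p.1 != p.2 then !(PySem.Set.contains relacion_set (p.2, p.1)) else true)
    then propiedades ++ ["Antisimétrica"] else propiedades
  let propiedades := if relacion_set.all (fun p => relacion_set.all (fun q => if p.2 == q.1 then PySem.Set.contains relacion_set (p.1, q.2) else true))
    then propiedades ++ ["Transitiva"] else propiedades
  if propiedades = [] then "Propiedades: No cumple con ninguna definición"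
  else "Propiedades: " ++ PySem.Str.join ", " propiedades

-- ===== PORT B =====
-- one pass over the set: update succ (second components indexed by first element), symmetry and antisymmetry flags
def pvPaso (rel : PySem.Set (Int × Int)) (st : Bool × Bool × PySem.Dict Int (List Int)) (p : Int × Int) :
    Bool × Bool × PySem.Dict Int (List Int) :=
  let succ := st.2.2.modify p.1 [] (fun xs => xs ++ [p.2])
  if !(PySem.Set.contains rel (p.2, p.1)) then (false, st.2.1, succ)
  else if p.1 ≠ p.2 then (st.1, false, succ)
  else (st.1, st.2.1, succ)

def analizar_propiedades_alt (relacion : List (Int × Int)) (base_set : List Int) : String :=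
  let rel : PySem.Set (Int × Int) := PySem.Set.ofList relacion
  let propiedades : List String := []
  let propiedades := if base_set.all (fun e => PySem.Set.contains rel (e, e))
    then propiedades ++ ["Reflexiva"] else propiedades
  let st := rel.foldl (pvPaso rel) (true, true, PySem.Dict.empty)
  let propiedades := if st.1 then propiedades ++ ["Simétrica"] else propiedades
  let propiedades := if st.2.1 then propiedades ++ ["Antisimétrica"] else propiedades
  let propiedades := if rel.all (fun p => (st.2.2.getD p.2 []).all (fun c => PySem.Set.contains rel (p.1, c)))
    then propiedades ++ ["Transitiva"] else propiedades
  if propiedades = [] then "Propiedades: No cumple con ninguna definición"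
  else "Propiedades: " ++ PySem.Str.join ", " propiedades

-- ===== PRECONDITION & SPEC =====
def Spec_analizar_propiedades (relacion : List (Int × Int)) (base_set : List Int) (out : String) : Prop := out = analizar_propiedades_alt relacion base_set
instance (relacion : List (Int × Int)) (base_set : List Int) (out : String) : Decidable (Spec_analizar_propiedades relacion base_set out) := by unfold Spec_analizar_propiedades; infer_instance

-- ===== CLAIM (what is proved, stated in full; the proofs are below) =====
def Claim_equal_analizar_propiedades : Prop := ∀ (relacion : List (Int × Int)) (base_set : List Int), Dom_analizar_propiedades relacion base_set → Spec_analizar_propiedades relacion base_set (analizar_propiedades relacion base_set)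

-- ===== LEMMAS AND PROOFS =====

-- decoding a decimal digit string, to prove str(n) injective on Int
def pvStep (a : Nat) (c : Char) : Nat := a * 10 + (c.toNat - 48)

lemma pvDigitCharVal (d : Nat) (h : d < 10) : (Nat.digitChar d).toNat - 48 = d := by
  interval_cases d <;> decide

lemma pvCore (fuel : Nat) : ∀ (n : Nat) (ds : List Char) (a : Nat), n < fuel →
    (Nat.toDigitsCore 10 fuel n ds).foldl pvStep a
      = ds.foldl pvStep (a * 10 ^ (Nat.log 10 n + 1) + n) := by
  induction fuel with
  | zero => intro n ds a h; exact absurd h (Nat.not_lt_zero n)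
  | succ f ih =>
    intro n ds a h
    rw [Nat.toDigitsCore]
    by_cases h10 : n / 10 = 0
    · have hn : n < 10 := by omega
      simp only [h10, if_true]
      rw [List.foldl_cons]
      have h1 : pvStep a (n % 10).digitChar = a * 10 + n := by
        rw [pvStep, pvDigitCharVal _ (Nat.mod_lt n (by norm_num)), Nat.mod_eq_of_lt hn]
      have h2 : Nat.log 10 n = 0 := Nat.log_eq_zero_iff.mpr (Or.inl hn)
      rw [h1, h2]
      norm_num
    · have hge : 10 ≤ n := by
        rcases Nat.lt_or_ge n 10 with hl | hg
        · exact absurd (Nat.div_eq_of_lt hl) h10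
        · exact hg
      have hf : n / 10 < f := lt_of_lt_of_le (Nat.div_lt_self (by omega) (by norm_num)) (by omega)
      simp only [h10, if_false]
      rw [ih _ _ _ hf, List.foldl_cons]
      have hlog : Nat.log 10 n = Nat.log 10 (n / 10) + 1 := by
        have := Nat.log_div_base 10 n
        have hpos : 0 < Nat.log 10 n := Nat.log_pos (by norm_num) hge
        omega
      rw [hlog]
      congr 1
      rw [pvStep, pvDigitCharVal _ (Nat.mod_lt n (by norm_num))]
      rw [show (10:ℕ) ^ (Nat.log 10 (n / 10) + 1 + 1) = 10 ^ (Nat.log 10 (n / 10) + 1) * 10 from pow_succ 10 _]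
      generalize (10:ℕ) ^ (Nat.log 10 (n / 10) + 1) = x
      have hdm : 10 * (n / 10) + n % 10 = n := Nat.div_add_mod n 10
      calc (a * x + n / 10) * 10 + n % 10 = a * (x * 10) + (10 * (n / 10) + n % 10) := by ring
        _ = a * (x * 10) + n := by rw [hdm]

lemma pvDecode (n : Nat) : (Nat.toDigits 10 n).foldl pvStep 0 = n := by
  rw [Nat.toDigits, pvCore (n + 1) n [] 0 (by omega)]
  simp

lemma pvHead (fuel : Nat) : ∀ (n : Nat) (ds : List Char),
    ∃ d, d < 10 ∧ ∃ t, Nat.toDigitsCore 10 (fuel + 1) n ds = Nat.digitChar d :: t := by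
  induction fuel with
  | zero =>
    intro n ds
    refine ⟨n % 10, Nat.mod_lt n (by norm_num), ?_⟩
    rw [Nat.toDigitsCore]
    by_cases h10 : n / 10 = 0
    · exact ⟨ds, by simp [h10]⟩
    · exact ⟨ds, by simp [h10, Nat.toDigitsCore]⟩
  | succ f ih =>
    intro n ds
    rw [Nat.toDigitsCore]
    by_cases h10 : n / 10 = 0
    · exact ⟨n % 10, Nat.mod_lt n (by norm_num), ds, by simp [h10]⟩
    · simp only [h10, if_false]
      exact ih (n / 10) _

lemma pvToDigits_inj {m n : Nat} (h : Nat.toDigits 10 m = Nat.toDigits 10 n) : m = n := by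
  have := pvDecode m
  rw [h, pvDecode] at this
  omega

lemma pvToDigits_head_ne (n : Nat) (c : Char) (t : List Char) (h : Nat.toDigits 10 n = c :: t) :
    c ≠ '-' := by
  obtain ⟨d, hd, t', ht⟩ := pvHead n n []
  rw [Nat.toDigits] at h
  rw [ht] at h
  cases h
  intro hc
  interval_cases d <;> simp_all <;> exact absurd hc (by decide)

lemma pvToStr_inj : Function.Injective PySem.Int.toStr := by
  intro m n h
  have hc : PySem.Int.toChars m = PySem.Int.toChars n := by
    have := congrArg String.toList h
    rwa [PySem.Int.toList_toStr, PySem.Int.toList_toStr] at this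
  rw [PySem.Int.toChars, PySem.Int.toChars] at hc
  by_cases hm : m < 0 <;> by_cases hn : n < 0
  · simp only [hm, hn, if_true] at hc
    have := pvToDigits_inj (List.cons.inj hc).2
    omega
  · simp only [hm, hn, if_true, if_false] at hc
    rcases hD : Nat.toDigits 10 n.toNat with _ | ⟨c, t⟩
    · rw [hD] at hc; exact absurd hc (by simp)
    · rw [hD] at hc
      exact absurd (List.cons.inj hc.symm).1 (pvToDigits_head_ne _ _ _ hD)
  · simp only [hm, hn, if_true, if_false] at hc
    rcases hD : Nat.toDigits 10 m.toNat with _ | ⟨c, t⟩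
    · rw [hD] at hc; exact absurd hc (by simp)
    · rw [hD] at hc
      exact absurd (List.cons.inj hc).1 (pvToDigits_head_ne _ _ _ hD)
  · simp only [hm, hn, if_false] at hc
    have := pvToDigits_inj hc
    omega

lemma pvStrPair_inj : Function.Injective pvStrPair := by
  intro p q h
  rw [pvStrPair, pvStrPair, Prod.mk.injEq] at h
  exact Prod.ext (pvToStr_inj h.1) (pvToStr_inj h.2)

-- set(map f xs) = map f (set(xs)) for injective f
lemma pvOfListMap {α β : Type} [BEq α] [LawfulBEq α] [BEq β] [LawfulBEq β] (f : α → β)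
    (hf : Function.Injective f) (l : List α) :
    PySem.Set.ofList (l.map f) = (PySem.Set.ofList l).map f := by
  induction l using List.reverseRecOn with
  | nil => rfl
  | append_singleton xs x ih =>
    rw [List.map_append, List.map_singleton, PySem.Set.ofList_append_singleton,
        PySem.Set.ofList_append_singleton, ih, PySem.Set.add_eq_ite, PySem.Set.add_eq_ite]
    by_cases hx : x ∈ PySem.Set.ofList xs
    · simp [hx, List.mem_map_of_injective hf]
    · simp [hx, List.mem_map_of_injective hf]

lemma pvContainsMap {α β : Type} [BEq α] [LawfulBEq α] [BEq β] [LawfulBEq β] (f : α → β)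
    (hf : Function.Injective f) (l : List α) (x : α) :
    PySem.Set.contains (l.map f) (f x) = PySem.Set.contains l x := by
  by_cases hx : x ∈ l
  · rw [(PySem.Set.contains_iff _ _).mpr hx,
        (PySem.Set.contains_iff _ _).mpr ((List.mem_map_of_injective hf).mpr hx)]
  · have h1 : ¬ f x ∈ l.map f := fun h => hx ((List.mem_map_of_injective hf).mp h)
    rw [Bool.eq_false_iff.mpr (fun h => h1 ((PySem.Set.contains_iff _ _).mp h)),
        Bool.eq_false_iff.mpr (fun h => hx ((PySem.Set.contains_iff _ _).mp h))]

-- the fused pass computes the two flags and the index dict independently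
lemma pvFold (rel : PySem.Set (Int × Int)) (l : List (Int × Int)) :
    ∀ (s t : Bool) (d : PySem.Dict Int (List Int)),
    l.foldl (pvPaso rel) (s, t, d)
      = (s && l.all (fun p => PySem.Set.contains rel (p.2, p.1)),
         t && l.all (fun p => !(PySem.Set.contains rel (p.2, p.1)) || (p.1 == p.2)),
         l.foldl (fun d p => d.modify p.1 [] (fun xs => xs ++ [p.2])) d) := by
  induction l with
  | nil => intro s t d; simp
  | cons p l ih =>
    intro s t d
    rw [List.foldl_cons, List.foldl_cons, List.all_cons, List.all_cons]
    by_cases hm : (p.2, p.1) ∈ rel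
    · by_cases he : p.1 = p.2
      · rw [he] at hm; simp [pvPaso, hm, he, ih]
      · simp [pvPaso, hm, he, ih]
    · by_cases he : p.1 = p.2
      · rw [he] at hm; simp [pvPaso, hm, he, ih]
      · simp [pvPaso, hm, ih]

-- the index dict holds, per key, the second components of the pairs with that first component
lemma pvSucc (l : List (Int × Int)) : ∀ (d : PySem.Dict Int (List Int)) (k : Int),
    (l.foldl (fun d p => d.modify p.1 [] (fun xs => xs ++ [p.2])) d).getD k []
      = d.getD k [] ++ (l.filter (fun p => p.1 == k)).map (fun p => p.2) := by
  induction l with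
  | nil => intro d k; simp
  | cons p l ih =>
    intro d k
    rw [List.foldl_cons, List.filter_cons, ih]
    by_cases h : p.1 = k
    · simp [h]
    · simp [h, PySem.Dict.getD_modify, Ne.symm h]

lemma pvFilterAll (g : Int → Bool) (b : Int) (l : List (Int × Int)) :
    ((l.filter (fun q => q.1 == b)).map (fun q => q.2)).all g
      = l.all (fun q => if b == q.1 then g q.2 else true) := by
  induction l with
  | nil => rfl
  | cons q l ih =>
    rw [List.filter_cons, List.all_cons]
    by_cases h : q.1 = b
    · simp [h, ih]
    · simp [h, Ne.symm h, ih]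

-- ===== VERDICT (by name: the statement is the Claim_ definition above) =====
theorem analizar_propiedades_spec : Claim_equal_analizar_propiedades := by
  intro relacion base_set _
  unfold Spec_analizar_propiedades analizar_propiedades analizar_propiedades_alt
  dsimp only
  rw [pvOfListMap pvStrPair pvStrPair_inj]
  rw [pvFold]
  set T := PySem.Set.ofList relacion with hT
  have c1 : base_set.all (fun e => PySem.Set.contains (T.map pvStrPair) (PySem.Int.toStr e, PySem.Int.toStr e))
      = base_set.all (fun e => PySem.Set.contains T (e, e)) := by
    congr 1; funext e
    exact pvContainsMap pvStrPair pvStrPair_inj T (e, e)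
  have c2 : (T.map pvStrPair).all (fun p => PySem.Set.contains (T.map pvStrPair) (p.2, p.1))
      = T.all (fun p => PySem.Set.contains T (p.2, p.1)) := by
    rw [List.all_map]; congr 1; funext p
    exact pvContainsMap pvStrPair pvStrPair_inj T (p.2, p.1)
  have c3 : (T.map pvStrPair).all (fun p => if p.1 != p.2 then !(PySem.Set.contains (T.map pvStrPair) (p.2, p.1)) else true)
      = T.all (fun p => !(PySem.Set.contains T (p.2, p.1)) || (p.1 == p.2)) := by
    rw [List.all_map]; congr 1; funext p
    by_cases he : p.1 = p.2
    · simp [pvStrPair, he]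
    · have hne : PySem.Int.toStr p.1 ≠ PySem.Int.toStr p.2 := fun h => he (pvToStr_inj h)
      simp only [Function.comp, pvStrPair, bne_iff_ne, ne_eq, hne, not_false_iff, if_true]
      rw [show (PySem.Int.toStr p.2, PySem.Int.toStr p.1) = pvStrPair (p.2, p.1) from rfl,
          pvContainsMap pvStrPair pvStrPair_inj T (p.2, p.1)]
      simp [he]
  have c4 : (T.map pvStrPair).all (fun p => (T.map pvStrPair).all (fun q => if p.2 == q.1 then PySem.Set.contains (T.map pvStrPair) (p.1, q.2) else true))
      = T.all (fun p => (((T.foldl (fun d p => d.modify p.1 [] (fun xs => xs ++ [p.2])) PySem.Dict.empty).getD p.2 []).all (fun c => PySem.Set.contains T (p.1, c)))) := by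
    rw [List.all_map]; congr 1; funext p
    simp only [Function.comp_apply]
    rw [List.all_map, pvSucc, PySem.Dict.getD_empty, List.nil_append, pvFilterAll]
    congr 1; funext q
    simp only [Function.comp_apply]
    by_cases hb : p.2 = q.1
    · simp only [pvStrPair, hb, beq_self_eq_true, if_true]
      exact pvContainsMap pvStrPair pvStrPair_inj T (p.1, q.2)
    · have hne : PySem.Int.toStr p.2 ≠ PySem.Int.toStr q.1 := fun h => hb (pvToStr_inj h)
      simp [pvStrPair, hne, hb]
  rw [c1, c2, c3, c4]
  simp only [Bool.true_and]
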